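-- pv_equiv track=rewrite | github.com/CHxNOBODY/CS-01418112 | ELAB_ทบทวน/2.py | get_hybrid_name
-- ===== SOURCE A (Python) =====
-- def get_hybrid_name(father, mother):
--     def before_second_vowel(name):
--         vowel_count = 0
--         for i, char in enumerate(name):
--             if char in 'aeiou':
--                 vowel_count += 1
--                 if vowel_count == 2:
--                     return name[:i]
--         return name
--
--     def after_first_vowel(name):
--         for i, char in enumerate(name):
--             if char in 'aeiou':
--                 return name[i+1:]
--         return name
--
--     part_father = before_second_vowel(father)
--     part_mother = after_first_vowel(mother)
--
--     hybrid_name = part_father + part_mother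
--     return hybrid_name
-- ===== SOURCE B (Python) =====
-- def get_hybrid_name(father, mother):
--     # first vowel position via str.find per vowel + min, instead of a char-by-char scan
--     def first_vowel(s):
--         hits = [p for p in (s.find(v) for v in 'aeiou') if p >= 0]
--         return min(hits) if hits else -1
--
--     i = first_vowel(father)
--     if i >= 0:
--         j = first_vowel(father[i + 1:])
--         part_father = father[:i + 1 + j] if j >= 0 else father
--     else:
--         part_father = father
--     k = first_vowel(mother)
--     part_mother = mother[k + 1:] if k >= 0 else mother
--     return part_father + part_mother
-- ===== Notes on version B (the rewrite author's own statement) =====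
-- stated objective: alternative
-- what changed: Replaces A's stateful char-by-char scans (a vowel-counter loop and a first-vowel loop) by locating each vowel letter with str.find (one C-level substring search per vowel) and taking the minimum hit, applied to the father, the father's tail after that hit, and the mother.
import Mathlib
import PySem

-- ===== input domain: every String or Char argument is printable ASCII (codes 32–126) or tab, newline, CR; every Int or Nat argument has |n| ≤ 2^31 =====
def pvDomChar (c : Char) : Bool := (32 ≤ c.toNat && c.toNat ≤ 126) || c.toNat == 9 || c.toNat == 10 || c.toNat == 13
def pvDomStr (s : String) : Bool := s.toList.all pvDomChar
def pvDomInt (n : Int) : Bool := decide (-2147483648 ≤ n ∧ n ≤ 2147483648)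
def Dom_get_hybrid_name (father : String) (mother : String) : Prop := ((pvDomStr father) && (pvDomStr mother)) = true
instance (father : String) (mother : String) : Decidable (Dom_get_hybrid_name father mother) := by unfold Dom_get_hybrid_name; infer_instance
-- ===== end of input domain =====

-- B replaces A's stateful char-by-char scans by locating each vowel letter with str.find
-- (one substring search per vowel) and taking the minimum hit; objective: alternative.


-- shared character predicate: Python's  char in 'aeiou'
def pvIsVowel (c : Char) : Bool := c == 'a' || c == 'e' || c == 'i' || c == 'o' || c == 'u'

-- ===== PORT A =====
-- the 'for i, char in enumerate(name)' loop of before_second_vowel, carrying i and vowel_count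
def pvA_beforeGo (name : List Char) : List Char → Nat → Nat → List Char
  | [], _, _ => name
  | c :: rest, i, cnt =>
    if pvIsVowel c then
      if cnt + 1 = 2 then name.take i
      else pvA_beforeGo name rest (i + 1) (cnt + 1)
    else pvA_beforeGo name rest (i + 1) cnt

-- the loop of after_first_vowel: on the first vowel return name[i+1:] (= the rest of the scan)
def pvA_afterGo (orig : List Char) : List Char → List Char
  | [] => orig
  | c :: rest => if pvIsVowel c then rest else pvA_afterGo orig rest

def get_hybrid_name (father : String) (mother : String) : String :=
  let part_father := pvA_beforeGo father.toList father.toList 0 0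
  let part_mother := pvA_afterGo mother.toList mother.toList
  String.ofList (part_father ++ part_mother)

-- ===== PORT B =====
-- first_vowel(s): [p for p in (s.find(v) for v in 'aeiou') if p >= 0], min of that or -1
def pvFirstVowel (s : List Char) : Int :=
  let hits := (['a', 'e', 'i', 'o', 'u'].map (fun v => PySem.Chars.find s [v])).filter
      (fun p => decide (0 ≤ p))
  match PySem.List.min? hits (fun x => x) with
  | some m => m
  | none => -1

-- slices father[:i+1+j] / mother[k+1:] have nonnegative bounds here, so take/drop are exact
def get_hybrid_name_alt (father : String) (mother : String) : String :=
  let f := father.toList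
  let m := mother.toList
  let i := pvFirstVowel f
  let part_father :=
    if 0 ≤ i then
      let j := pvFirstVowel (f.drop (i + 1).toNat)
      if 0 ≤ j then f.take (i + 1 + j).toNat else f
    else f
  let k := pvFirstVowel m
  let part_mother := if 0 ≤ k then m.drop (k + 1).toNat else m
  String.ofList (part_father ++ part_mother)

-- ===== PRECONDITION & SPEC =====
def Spec_get_hybrid_name (father : String) (mother : String) (out : String) : Prop := out = get_hybrid_name_alt father mother
instance (father : String) (mother : String) (out : String) : Decidable (Spec_get_hybrid_name father mother out) := by unfold Spec_get_hybrid_name; infer_instance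

-- ===== CLAIM (what is proved, stated in full; the proofs are below) =====
def Claim_equal_get_hybrid_name : Prop := ∀ (father : String) (mother : String), Dom_get_hybrid_name father mother → Spec_get_hybrid_name father mother (get_hybrid_name father mother)

-- ===== LEMMAS AND PROOFS =====

lemma pv_singleton_prefix_iff (v : Char) (t : List Char) : [v] <+: t ↔ t.head? = some v := by
  cases t <;> simp [List.cons_prefix_cons, eq_comm]

lemma pv_singleton_prefix_drop (v : Char) (l : List Char) (j : Nat) :
    [v] <+: l.drop j ↔ l[j]? = some v := by
  rw [pv_singleton_prefix_iff, List.head?_drop]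

lemma pv_singleton_infix_iff (v : Char) (l : List Char) : [v] <:+: l ↔ v ∈ l := by
  constructor
  · intro h; exact h.mem (by simp)
  · intro h; obtain ⟨a, b, rfl⟩ := List.mem_iff_append.mp h; exact ⟨a, b, by simp⟩

-- B's per-vowel find + min computes the index of the first vowel (or -1)
lemma pvFirstVowel_eq (s : List Char) :
    pvFirstVowel s = match List.findIdx? pvIsVowel s with
      | some n => (n : Int)
      | none => -1 := by
  unfold pvFirstVowel
  have hvow : ∀ v ∈ (['a', 'e', 'i', 'o', 'u'] : List Char), pvIsVowel v = true := by
    intro v hv; fin_cases hv <;> rfl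
  cases hfv : List.findIdx? pvIsVowel s with
  | none =>
    have hall : ∀ x ∈ s, pvIsVowel x = false := List.findIdx?_eq_none_iff.mp hfv
    have hnil : (['a', 'e', 'i', 'o', 'u'].map (fun v => PySem.Chars.find s [v])).filter
        (fun p => decide (0 ≤ p)) = [] := by
      rw [List.filter_eq_nil_iff]
      intro x hx
      obtain ⟨v, hv, rfl⟩ := List.mem_map.mp hx
      simp only [decide_eq_true_eq]
      intro h0
      have hmem : v ∈ s := (pv_singleton_infix_iff v s).mp
        ((PySem.Chars.find_nonneg_iff s [v]).mp h0)
      have := hall v hmem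
      rw [hvow v hv] at this
      simp at this
    rw [hnil]
    simp [PySem.List.min?]
  | some n =>
    obtain ⟨hl, hp, hmin⟩ := List.findIdx?_eq_some_iff_getElem.mp hfv
    -- every hit is ≥ n
    have hge : ∀ x ∈ (['a', 'e', 'i', 'o', 'u'].map (fun v => PySem.Chars.find s [v])).filter
        (fun p => decide (0 ≤ p)), (n : Int) ≤ x := by
      intro x hx
      obtain ⟨hxm, hx0⟩ := List.mem_filter.mp hx
      have hx0' : 0 ≤ x := of_decide_eq_true hx0
      obtain ⟨v, hv, rfl⟩ := List.mem_map.mp hxm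
      obtain ⟨hpre, -⟩ := PySem.Chars.find_spec hx0'
      have hgetv : s[(PySem.Chars.find s [v]).toNat]? = some v :=
        (pv_singleton_prefix_drop v s _).mp hpre
      have hlt : (PySem.Chars.find s [v]).toNat < s.length := (List.getElem?_eq_some_iff.mp hgetv).1
      have hvn : pvIsVowel (s[(PySem.Chars.find s [v]).toNat]'hlt) = true := by
        have := (List.getElem?_eq_some_iff.mp hgetv).2
        rw [this]; exact hvow v hv
      have : ¬ (PySem.Chars.find s [v]).toNat < n := fun hlt' => hmin _ hlt' hvn
      omega
    -- n itself is a hit (via the vowel letter s[n])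
    have hcmem : s[n]'hl ∈ (['a', 'e', 'i', 'o', 'u'] : List Char) := by
      have := hp; unfold pvIsVowel at this
      rcases Bool.or_eq_true_iff.mp this with h | h
      · rcases Bool.or_eq_true_iff.mp h with h | h
        · rcases Bool.or_eq_true_iff.mp h with h | h
          · rcases Bool.or_eq_true_iff.mp h with h | h
            · simp [eq_of_beq h]
            · simp [eq_of_beq h]
          · simp [eq_of_beq h]
        · simp [eq_of_beq h]
      · simp [eq_of_beq h]
    have hgetn : s[n]? = some (s[n]'hl) := List.getElem?_eq_some_iff.mpr ⟨hl, rfl⟩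
    have hinf : [s[n]'hl] <:+: s := by
      rw [pv_singleton_infix_iff]; exact List.getElem_mem hl
    have hfnn : 0 ≤ PySem.Chars.find s [s[n]'hl] := (PySem.Chars.find_nonneg_iff s _).mpr hinf
    obtain ⟨hpre, hfirst⟩ := PySem.Chars.find_spec hfnn
    have hfn : PySem.Chars.find s [s[n]'hl] = (n : Int) := by
      have hle : (PySem.Chars.find s [s[n]'hl]).toNat ≤ n := by
        by_contra h
        exact hfirst n (by omega) ((pv_singleton_prefix_drop _ s n).mpr hgetn)
      have hgef : s[(PySem.Chars.find s [s[n]'hl]).toNat]? = some (s[n]'hl) :=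
        (pv_singleton_prefix_drop _ s _).mp hpre
      have hltf : (PySem.Chars.find s [s[n]'hl]).toNat < s.length := (List.getElem?_eq_some_iff.mp hgef).1
      have hvf : pvIsVowel (s[(PySem.Chars.find s [s[n]'hl]).toNat]'hltf) = true := by
        rw [(List.getElem?_eq_some_iff.mp hgef).2]; exact hp
      have : ¬ (PySem.Chars.find s [s[n]'hl]).toNat < n := fun hlt' => hmin _ hlt' hvf
      omega
    have hnmem : (n : Int) ∈ (['a', 'e', 'i', 'o', 'u'].map (fun v => PySem.Chars.find s [v])).filter
        (fun p => decide (0 ≤ p)) := by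
      refine List.mem_filter.mpr ⟨?_, by simp⟩
      exact List.mem_map.mpr ⟨s[n]'hl, hcmem, hfn⟩
    cases hmn : PySem.List.min? ((['a', 'e', 'i', 'o', 'u'].map (fun v => PySem.Chars.find s [v])).filter
        (fun p => decide (0 ≤ p))) (fun x => x) with
    | none =>
      rw [PySem.List.min?_eq_none_iff] at hmn
      rw [hmn] at hnmem
      exact absurd hnmem (List.not_mem_nil)
    | some m =>
      have h1 : (n : Int) ≤ m := hge m (PySem.List.min?_mem hmn)
      have h2 : m ≤ (n : Int) := PySem.List.min?_isMin hmn _ hnmem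
      simp only [hmn]
      omega

-- A's after_first_vowel loop, characterised by the first vowel index of the suffix
lemma pvAfterGo_fv (orig : List Char) : ∀ (l : List Char) (i : Nat), orig.drop i = l →
    pvA_afterGo orig l = match List.findIdx? pvIsVowel l with
      | some n => orig.drop (i + n + 1)
      | none => orig := by
  intro l
  induction l with
  | nil => intro i _; simp [pvA_afterGo]
  | cons c rest ih =>
    intro i hdrop
    have hrest : orig.drop (i + 1) = rest := by
      have := congrArg (List.drop 1) hdrop
      simpa [List.drop_drop, Nat.add_comm] using this
    by_cases h : pvIsVowel c = true
    · simp [pvA_afterGo, List.findIdx?_cons, h, ← hrest]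
    · rw [List.findIdx?_cons, if_neg h]
      rw [show pvA_afterGo orig (c :: rest) = pvA_afterGo orig rest from by simp [pvA_afterGo, h]]
      rw [ih (i + 1) hrest]
      cases List.findIdx? pvIsVowel rest with
      | none => rfl
      | some n => simp only [Option.map_some]; rw [show i + 1 + n + 1 = i + (n + 1) + 1 from by omega]

-- A's before_second_vowel loop after the first vowel was seen (vowel_count = 1)
lemma pvBeforeGo_one (name : List Char) : ∀ (l : List Char) (i : Nat),
    pvA_beforeGo name l i 1 = match List.findIdx? pvIsVowel l with
      | some n => name.take (i + n)
      | none => name := by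
  intro l
  induction l with
  | nil => intro i; simp [pvA_beforeGo]
  | cons c rest ih =>
    intro i
    by_cases h : pvIsVowel c = true
    · simp [pvA_beforeGo, List.findIdx?_cons, h]
    · rw [List.findIdx?_cons, if_neg h]
      rw [show pvA_beforeGo name (c :: rest) i 1 = pvA_beforeGo name rest (i + 1) 1 from by
        simp [pvA_beforeGo, h]]
      rw [ih (i + 1)]
      cases List.findIdx? pvIsVowel rest with
      | none => rfl
      | some n => simp only [Option.map_some]; rw [show i + 1 + n = i + (n + 1) from by omega]

-- A's before_second_vowel loop from the start (vowel_count = 0)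
lemma pvBeforeGo_zero (name : List Char) : ∀ (l : List Char) (i : Nat),
    pvA_beforeGo name l i 0 = match List.findIdx? pvIsVowel l with
      | none => name
      | some n =>
        match List.findIdx? pvIsVowel (l.drop (n + 1)) with
        | some m => name.take (i + n + 1 + m)
        | none => name := by
  intro l
  induction l with
  | nil => intro i; simp [pvA_beforeGo]
  | cons c rest ih =>
    intro i
    by_cases h : pvIsVowel c = true
    · rw [List.findIdx?_cons, if_pos h]
      rw [show pvA_beforeGo name (c :: rest) i 0 = pvA_beforeGo name rest (i + 1) 1 from by
        simp [pvA_beforeGo, h]]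
      rw [pvBeforeGo_one name rest (i + 1)]
      simp
    · rw [List.findIdx?_cons, if_neg h]
      rw [show pvA_beforeGo name (c :: rest) i 0 = pvA_beforeGo name rest (i + 1) 0 from by
        simp [pvA_beforeGo, h]]
      rw [ih (i + 1)]
      cases List.findIdx? pvIsVowel rest with
      | none => rfl
      | some n =>
        simp only [Option.map_some, List.drop_succ_cons]
        cases List.findIdx? pvIsVowel (rest.drop (n + 1)) with
        | none => rfl
        | some m => simp only []; rw [show i + 1 + n + 1 + m = i + (n + 1) + 1 + m from by omega]

-- ===== VERDICT (by name: the statement is the Claim_ definition above) =====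
theorem get_hybrid_name_spec : Claim_equal_get_hybrid_name := by
  intro father mother _
  unfold Spec_get_hybrid_name get_hybrid_name get_hybrid_name_alt
  simp only [pvFirstVowel_eq]
  rw [pvBeforeGo_zero father.toList father.toList 0,
      pvAfterGo_fv mother.toList mother.toList 0 (by simp)]
  cases hf : List.findIdx? pvIsVowel father.toList with
  | none =>
    cases hm : List.findIdx? pvIsVowel mother.toList with
    | none => simp
    | some k =>
      have hk1 : ((k : Int) + 1).toNat = 0 + k + 1 := by omega
      simp only []
      norm_num [hk1]
  | some n =>
    have hn1 : ((n : Int) + 1).toNat = n + 1 := by omega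
    simp only []
    rw [hn1]
    cases hg : List.findIdx? pvIsVowel (father.toList.drop (n + 1)) with
    | none =>
      cases hm : List.findIdx? pvIsVowel mother.toList with
      | none => simp
      | some k =>
        have hk1 : ((k : Int) + 1).toNat = 0 + k + 1 := by omega
        simp only []
        norm_num [hk1]
    | some m =>
      have hnm : ((n : Int) + 1 + (m : Int)).toNat = 0 + n + 1 + m := by omega
      cases hm : List.findIdx? pvIsVowel mother.toList with
      | none => simp only []; norm_num [hnm]
      | some k =>
        have hk1 : ((k : Int) + 1).toNat = 0 + k + 1 := by omega
        simp only []
        norm_num [hnm, hk1]
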